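-- pv_equiv track=rewrite | github.com/natasha-dudek/DeepGenomeVector | evaluate.py | complete_mods
-- ===== SOURCE A (Python) =====
-- from collections import defaultdict
--
-- def complete_mods(generated, all_kos, mod_to_ko_clean):
-- 	"""
-- 	Calculate the number of complete modules (all req'd KOs are present) in a set of genomes
--
-- 	Arguments:
-- 		generated (tensor) -- generated genome vectors. Rows are genomes, columns are genes. 1's denote a gene is encoded, 0 denotes that it is not
-- 		all_kos (list) -- list of all KOs in the dataset
-- 		mod_to_ko_clean (dict )-- the functions of many modules can be "completed" by different sets of genes. Here we choose to represent each module by the most common set of genes. Dict maps each module (e.g.: 'K00001') to a list of genes (e.g.: ['K00845', ..., 'K00873'])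
--
-- 	Returns:
-- 		gen_mods (defaultdict) -- for each genome vector (denoted by their index), list of complete mods encoded
-- 	"""
-- 	gen_kos = defaultdict(list)
-- 	for i, row in enumerate(generated):
-- 		for j in range(len(row)):
-- 			if row[j] == 1:
-- 				gen_kos[i].append(all_kos[j])
--
-- 	gen_mods = defaultdict(list)
-- 	for genome in gen_kos:
-- 		my_kos = gen_kos[genome]
--
-- 		for mod in mod_to_ko_clean:
-- 			complete = True
-- 			for ko in mod_to_ko_clean[mod]:
-- 				if ko not in my_kos:
-- 					complete = False
--
-- 			if complete:
-- 				gen_mods[genome].append(mod)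
--
-- 	return gen_mods
-- ===== SOURCE B (Python) =====
-- from collections import defaultdict
--
-- def complete_mods(generated, all_kos, mod_to_ko_clean):
--     # Inverted index: each KO -> modules requiring it; a module is complete
--     # when its coverage counter reaches its number of distinct required KOs.
--     sizes = {}
--     index = defaultdict(list)
--     for mod, req in mod_to_ko_clean.items():
--         distinct = list(dict.fromkeys(req))
--         sizes[mod] = len(distinct)
--         for ko in distinct:
--             index[ko].append(mod)
--
--     gen_mods = defaultdict(list)
--     for i, row in enumerate(generated):
--         kos = list(dict.fromkeys(all_kos[j] for j, v in enumerate(row) if v == 1))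
--         if not kos:
--             continue
--         cov = defaultdict(int)
--         for ko in kos:
--             for mod in index[ko]:
--                 cov[mod] += 1
--         mods = [mod for mod in mod_to_ko_clean if cov[mod] == sizes[mod]]
--         if mods:
--             gen_mods[i] = mods
--     return gen_mods
-- ===== Notes on version B (the rewrite author's own statement) =====
-- stated objective: alternative
-- what changed: Instead of re-scanning every module's full required-KO list with a linear 'ko in my_kos' membership test per genome, B precomputes an inverted index KO->modules and each module's distinct-KO count once, then per genome bumps a coverage counter for each of its distinct KOs and declares a module complete when its counter equals its size.
import Mathlib
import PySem

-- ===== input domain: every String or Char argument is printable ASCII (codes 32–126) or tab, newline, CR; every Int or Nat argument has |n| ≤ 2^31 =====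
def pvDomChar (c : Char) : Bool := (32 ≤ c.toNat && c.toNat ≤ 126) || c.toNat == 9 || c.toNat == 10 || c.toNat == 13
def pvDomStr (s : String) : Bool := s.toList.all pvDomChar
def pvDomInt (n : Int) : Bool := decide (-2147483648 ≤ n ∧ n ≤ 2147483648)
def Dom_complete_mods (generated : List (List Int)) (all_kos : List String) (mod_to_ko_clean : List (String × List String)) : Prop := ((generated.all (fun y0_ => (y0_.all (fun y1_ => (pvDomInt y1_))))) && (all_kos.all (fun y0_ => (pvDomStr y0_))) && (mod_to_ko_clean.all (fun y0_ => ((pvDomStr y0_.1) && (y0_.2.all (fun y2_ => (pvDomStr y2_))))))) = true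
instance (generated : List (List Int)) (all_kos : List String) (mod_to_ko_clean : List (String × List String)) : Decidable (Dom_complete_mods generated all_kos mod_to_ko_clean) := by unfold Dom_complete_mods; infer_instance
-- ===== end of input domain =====

-- B replaces A's per-genome scan over every module's full KO list by an inverted KO→modules index
-- with per-module coverage counters (objective: alternative decomposition; same observable return value).

-- ===== PORT A =====
def complete_mods (generated : List (List Int)) (all_kos : List String) (mod_to_ko_clean : List (String × List String)) : List (Int × List String) :=
  let md := PySem.Dict.ofList mod_to_ko_clean
  let gen_kos : PySem.Dict Int (List String) :=
    (PySem.List.enumerate generated).foldl (fun d ir =>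
      (PySem.List.pyRange 0 (ir.2.length : Int) 1).foldl (fun d j =>
        if PySem.List.pyGetD ir.2 j 0 = 1 then
          d.modify ir.1 [] (· ++ [PySem.List.pyGetD all_kos j ""])
        else d) d) (PySem.Dict.mk [])
  let gen_mods : PySem.Dict Int (List String) :=
    gen_kos.keys.foldl (fun gm genome =>
      let my_kos := gen_kos.getD genome []
      md.keys.foldl (fun gm mod =>
        let complete := (md.getD mod []).foldl (fun c ko => if my_kos.contains ko then c else false) true
        if complete then gm.modify genome [] (· ++ [mod]) else gm) gm) (PySem.Dict.mk [])
  gen_mods.items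

-- ===== PORT B =====
def complete_mods_alt (generated : List (List Int)) (all_kos : List String) (mod_to_ko_clean : List (String × List String)) : List (Int × List String) :=
  let md := PySem.Dict.ofList mod_to_ko_clean
  let si : PySem.Dict String Int × PySem.Dict String (List String) :=
    md.items.foldl (fun p mr =>
      let distinct := PySem.List.dedup mr.2
      ((p.1.insert mr.1 (distinct.length : Int)),
       distinct.foldl (fun ix ko => ix.modify ko [] (· ++ [mr.1])) p.2))
      (PySem.Dict.mk [], PySem.Dict.mk [])
  let sizes := si.1
  let index := si.2
  let gen_mods : PySem.Dict Int (List String) :=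
    (PySem.List.enumerate generated).foldl (fun gm ir =>
      let kos := PySem.List.dedup
        (((PySem.List.enumerate ir.2).filter (fun jv => jv.2 = 1)).map
          (fun jv => PySem.List.pyGetD all_kos jv.1 ""))
      if kos.isEmpty then gm
      else
        let cov : PySem.Dict String Int := kos.foldl (fun cov ko =>
          (index.getD ko []).foldl (fun cov mod => cov.modify mod 0 (· + 1)) cov) (PySem.Dict.mk [])
        let mods := md.keys.filter (fun mod => cov.getD mod 0 = sizes.getD mod 0)
        if mods.isEmpty then gm else gm.insert ir.1 mods) (PySem.Dict.mk [])
  gen_mods.items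

-- ===== PRECONDITION & SPEC =====
-- Pre_ excludes exactly the inputs where A raises IndexError: a row with a 1 at a column beyond len(all_kos).
def Pre_complete_mods (generated : List (List Int)) (all_kos : List String) (mod_to_ko_clean : List (String × List String)) : Prop :=
  ∀ row ∈ generated, ∀ j ∈ List.range row.length, row.getD j 0 = 1 → j < all_kos.length
instance (generated : List (List Int)) (all_kos : List String) (mod_to_ko_clean : List (String × List String)) : Decidable (Pre_complete_mods generated all_kos mod_to_ko_clean) := by unfold Pre_complete_mods; infer_instance
def pvWitness_complete_mods : List (List Int) × List String × (List (String × List String)) :=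
  ([[1, 0], [0, 1], [1, 1]], ["K1", "K2"], [("M1", ["K1"]), ("M2", ["K1", "K2"]), ("M3", ["K3"])])
def Spec_complete_mods (generated : List (List Int)) (all_kos : List String) (mod_to_ko_clean : List (String × List String)) (out : List (Int × List String)) : Prop := out = complete_mods_alt generated all_kos mod_to_ko_clean
instance (generated : List (List Int)) (all_kos : List String) (mod_to_ko_clean : List (String × List String)) (out : List (Int × List String)) : Decidable (Spec_complete_mods generated all_kos mod_to_ko_clean out) := by unfold Spec_complete_mods; infer_instance

-- ===== CLAIM (what is proved, stated in full; the proofs are below) =====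
def Claim_equal_complete_mods : Prop := ∀ (generated : List (List Int)) (all_kos : List String) (mod_to_ko_clean : List (String × List String)), Dom_complete_mods generated all_kos mod_to_ko_clean → Pre_complete_mods generated all_kos mod_to_ko_clean → Spec_complete_mods generated all_kos mod_to_ko_clean (complete_mods generated all_kos mod_to_ko_clean)


-- ===== LEMMAS AND PROOFS =====

-- appending repeatedly to the value of the LAST entry of a dict
theorem pv_app_loop_last {kappa sigma : Type} [BEq kappa] [LawfulBEq kappa] (i : kappa) (xs : List sigma) :
    ∀ (pre : List (kappa × List sigma)) (v : List sigma), (∀ p ∈ pre, (p.1 == i) = false) →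
    xs.foldl (fun d x => d.modify i [] (· ++ [x])) (PySem.Dict.mk (pre ++ [(i, v)]))
      = PySem.Dict.mk (pre ++ [(i, v ++ xs)]) := by
  induction xs with
  | nil => intro pre v h; simp
  | cons x xs ih =>
    intro pre v h
    have hfind : List.find? (fun p => p.1 == i) pre = none := by
      apply List.find?_eq_none.mpr
      intro p hp
      simp [h p hp]
    have hget : (PySem.Dict.mk (pre ++ [(i, v)])).get? i = some v := by
      simp [PySem.Dict.get?, List.find?_append, hfind]
    have hcont : (PySem.Dict.mk (pre ++ [(i, v)])).contains i = true := by
      simp [PySem.Dict.contains, List.any_append]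
    have hstep : (PySem.Dict.mk (pre ++ [(i, v)])).modify i [] (· ++ [x])
        = PySem.Dict.mk (pre ++ [(i, v ++ [x])]) := by
      simp only [PySem.Dict.modify, PySem.Dict.getD, hget, Option.getD_some,
        PySem.Dict.insert, hcont, if_pos]
      congr 1
      rw [List.map_append]
      congr 1
      · apply List.map_congr_left ?_ |>.trans (List.map_id _)
        intro p hp; simp [h p hp]
      · simp
    rw [List.foldl_cons, hstep, ih pre (v ++ [x]) h, List.append_assoc]
    simp

-- appending repeatedly at a key absent from the dict
theorem pv_app_loop_fresh {kappa sigma : Type} [BEq kappa] [LawfulBEq kappa] (i : kappa) (xs : List sigma)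
    (d : PySem.Dict kappa (List sigma)) (h : ∀ p ∈ d.items, (p.1 == i) = false) :
    xs.foldl (fun d x => d.modify i [] (· ++ [x])) d
      = if xs = [] then d else PySem.Dict.mk (d.items ++ [(i, xs)]) := by
  cases xs with
  | nil => simp
  | cons x xs =>
    have hfind : List.find? (fun p => p.1 == i) d.items = none := by
      apply List.find?_eq_none.mpr
      intro p hp; simp [h p hp]
    have hcont : d.contains i = false := by
      simp only [PySem.Dict.contains, List.any_eq_false]
      intro p hp; simp [h p hp]
    have hstep : d.modify i [] (· ++ [x]) = PySem.Dict.mk (d.items ++ [(i, [x])]) := by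
      simp [PySem.Dict.modify, PySem.Dict.getD, PySem.Dict.get?, hfind, PySem.Dict.insert, hcont]
    rw [List.foldl_cons, hstep, pv_app_loop_last i xs d.items [x] h]
    simp

-- a loop over pairwise-distinct fresh keys, appending the whole list g p at key p.1
theorem pv_fresh_loop {kappa alpha sigma : Type} [BEq kappa] [LawfulBEq kappa] (g : kappa × alpha → List sigma) :
    ∀ (es : List (kappa × alpha)) (acc : List (kappa × List sigma)),
    (∀ q ∈ acc, ∀ p ∈ es, (q.1 == p.1) = false) → (es.map (·.1)).Nodup →
    es.foldl (fun gm p => (g p).foldl (fun gm x => gm.modify p.1 [] (· ++ [x])) gm) (PySem.Dict.mk acc)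
      = PySem.Dict.mk (acc ++ es.filterMap (fun p => if g p = [] then none else some (p.1, g p))) := by
  intro es
  induction es with
  | nil => intro acc _ _; simp
  | cons p es ih =>
    intro acc hacc hnd
    rw [List.foldl_cons, pv_app_loop_fresh p.1 (g p) (PySem.Dict.mk acc)
      (by intro q hq; exact hacc q hq p (List.mem_cons_self))]
    simp only [List.map_cons, List.nodup_cons] at hnd
    by_cases hg : g p = []
    · rw [if_pos hg, ih acc (fun q hq p' hp' => hacc q hq p' (List.mem_cons_of_mem _ hp')) hnd.2]
      simp [hg]
    · rw [if_neg hg]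
      rw [ih (acc ++ [(p.1, g p)]) ?_ hnd.2]
      · simp [hg, List.append_assoc]
      · intro q hq p' hp'
        rcases List.mem_append.mp hq with hq | hq
        · exact hacc q hq p' (List.mem_cons_of_mem _ hp')
        · simp only [List.mem_singleton] at hq
          subst hq
          simp only [beq_eq_false_iff_ne, ne_eq]
          intro he
          exact hnd.1 (he ▸ List.mem_map_of_mem hp')

-- a loop over pairwise-distinct fresh keys, conditionally inserting a value
theorem pv_fresh_insert_loop {kappa alpha nu : Type} [BEq kappa] [LawfulBEq kappa] (h : kappa × alpha → Option nu) :
    ∀ (es : List (kappa × alpha)) (acc : List (kappa × nu)),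
    (∀ q ∈ acc, ∀ p ∈ es, (q.1 == p.1) = false) → (es.map (·.1)).Nodup →
    es.foldl (fun gm p => match h p with | none => gm | some v => gm.insert p.1 v) (PySem.Dict.mk acc)
      = PySem.Dict.mk (acc ++ es.filterMap (fun p => (h p).map (fun v => (p.1, v)))) := by
  intro es
  induction es with
  | nil => intro acc _ _; simp
  | cons p es ih =>
    intro acc hacc hnd
    simp only [List.map_cons, List.nodup_cons] at hnd
    rw [List.foldl_cons]
    cases hp : h p with
    | none =>
      rw [ih acc (fun q hq p' hp' => hacc q hq p' (List.mem_cons_of_mem _ hp')) hnd.2]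
      simp [hp]
    | some v =>
      have hcont : (PySem.Dict.mk acc).contains p.1 = false := by
        simp only [PySem.Dict.contains, List.any_eq_false]
        intro q hq; simp [hacc q hq p (List.mem_cons_self)]
      rw [show (match some v with
            | none => PySem.Dict.mk acc
            | some w => (PySem.Dict.mk acc).insert p.1 w) = PySem.Dict.mk (acc ++ [(p.1, v)]) from by
          simp [PySem.Dict.insert, hcont]]
      rw [ih (acc ++ [(p.1, v)]) ?_ hnd.2]
      · simp [hp, List.append_assoc]
      · intro q hq p' hp'
        rcases List.mem_append.mp hq with hq | hq
        · exact hacc q hq p' (List.mem_cons_of_mem _ hp')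
        · simp only [List.mem_singleton] at hq
          subst hq
          simp only [beq_eq_false_iff_ne, ne_eq]
          intro he
          exact hnd.1 (he ▸ List.mem_map_of_mem hp')

-- nested fold = fold over the flattened list
theorem pv_foldl_flatten {alpha beta delta : Type} (g : alpha → List beta) (f : delta → beta → delta) :
    ∀ (l : List alpha) (d : delta),
    l.foldl (fun d x => (g x).foldl f d) d = (l.flatMap g).foldl f d := by
  intro l
  induction l with
  | nil => intro d; simp
  | cons x l ih => intro d; simp [List.foldl_append, ih]


-- ---- shared shape helpers ----
def pvKos (all_kos : List String) (row : List Int) : List String :=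
  ((PySem.List.enumerate row).filter (fun jv => jv.2 = 1)).map (fun jv => PySem.List.pyGetD all_kos jv.1 "")

def pvMods (md : PySem.Dict String (List String)) (kos : List String) : List String :=
  md.keys.filter (fun mod => (md.getD mod []).all (fun ko => kos.contains ko))

def pvEntry (all_kos : List String) (ir : Int × List Int) : Option (Int × List String) :=
  if pvKos all_kos ir.2 = [] then none else some (ir.1, pvKos all_kos ir.2)

theorem pv_filterMap_ifn {alpha beta : Type} (c : alpha → Prop) [DecidablePred c] (f : alpha → beta) (l : List alpha) :
    l.filterMap (fun x => if c x then none else some (f x))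
      = (l.filter (fun x => !decide (c x))).map f := by
  induction l with
  | nil => simp
  | cons x l ih => by_cases h : c x <;> simp [h, ih]

theorem pv_nodup_fst_enumerate {alpha : Type} (xs : List alpha) :
    ((PySem.List.enumerate xs).map (·.1)).Nodup :=
  List.Pairwise.map _ (fun _ _ h => ne_of_lt h) (PySem.List.pairwise_lt_enumerate xs 0)

theorem pv_entries_fst_nodup (all_kos : List String) (gs : List (List Int)) :
    (((PySem.List.enumerate gs).filterMap (pvEntry all_kos)).map (·.1)).Nodup := by
  have h1 : (PySem.List.enumerate gs).filterMap (pvEntry all_kos)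
      = ((PySem.List.enumerate gs).filter (fun ir => !decide (pvKos all_kos ir.2 = []))).map
          (fun ir => (ir.1, pvKos all_kos ir.2)) := by
    unfold pvEntry
    exact pv_filterMap_ifn _ _ _
  rw [h1, List.map_map]
  exact (pv_nodup_fst_enumerate gs).sublist (List.Sublist.map _ List.filter_sublist)

theorem pv_completeA {alpha : Type} (p : alpha → Bool) (req : List alpha) :
    ∀ c : Bool, req.foldl (fun c ko => if p ko then c else false) c = (c && req.all p) := by
  induction req with
  | nil => intro c; simp
  | cons k req ih =>
    intro c
    rw [List.foldl_cons]
    cases h : p k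
    · rw [if_neg (by simp [h]), ih false]
      simp [h]
    · rw [if_pos (by simp [h]), ih c]
      simp [h]

theorem pv_innerA (all_kos : List String) (row : List Int) (i : Int) (d : PySem.Dict Int (List String)) :
    (PySem.List.pyRange 0 (row.length : Int) 1).foldl (fun d j =>
        if PySem.List.pyGetD row j 0 = 1 then d.modify i [] (· ++ [PySem.List.pyGetD all_kos j ""]) else d) d
      = (pvKos all_kos row).foldl (fun d x => d.modify i [] (· ++ [x])) d := by
  unfold pvKos
  rw [PySem.List.enumerate_eq_map_pyRange row 0]
  rw [List.filter_map, List.map_map, List.foldl_map]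
  rw [PySem.List.foldl_ite_eq_foldl_filter (fun j => PySem.List.pyGetD row j 0 = 1)
    (fun d j => d.modify i [] (· ++ [PySem.List.pyGetD all_kos j ""])) _ d]
  simp only [PySem.List.len, Function.comp]
  rfl


def pvOut (all_kos : List String) (md : PySem.Dict String (List String)) (ir : Int × List Int) :
    Option (Int × List String) :=
  (pvEntry all_kos ir).bind (fun p => if pvMods md p.2 = [] then none else some (p.1, pvMods md p.2))

theorem pv_genkosA (generated : List (List Int)) (all_kos : List String) :
    (PySem.List.enumerate generated).foldl (fun d ir =>
      (PySem.List.pyRange 0 (ir.2.length : Int) 1).foldl (fun d j =>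
        if PySem.List.pyGetD ir.2 j 0 = 1 then d.modify ir.1 [] (· ++ [PySem.List.pyGetD all_kos j ""]) else d) d)
      (PySem.Dict.mk [])
      = PySem.Dict.mk ((PySem.List.enumerate generated).filterMap (pvEntry all_kos)) := by
  have h1 := PySem.List.foldl_congr_mem (PySem.List.enumerate generated)
    (fun d ir =>
      (PySem.List.pyRange 0 (ir.2.length : Int) 1).foldl (fun d j =>
        if PySem.List.pyGetD ir.2 j 0 = 1 then d.modify ir.1 [] (· ++ [PySem.List.pyGetD all_kos j ""]) else d) d)
    (fun d ir => (pvKos all_kos ir.2).foldl (fun d x => d.modify ir.1 [] (· ++ [x])) d)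
    (PySem.Dict.mk [])
    (fun acc ir _ => pv_innerA all_kos ir.2 ir.1 acc)
  rw [h1, pv_fresh_loop (fun ir : Int × List Int => pvKos all_kos ir.2) _ []
    (by intro q hq; simp at hq) (pv_nodup_fst_enumerate generated)]
  rfl

theorem pv_A_char (generated : List (List Int)) (all_kos : List String) (m2k : List (String × List String)) :
    complete_mods generated all_kos m2k
      = (PySem.List.enumerate generated).filterMap (pvOut all_kos (PySem.Dict.ofList m2k)) := by
  have hnodup : (PySem.Dict.mk ((PySem.List.enumerate generated).filterMap (pvEntry all_kos))).keys.Nodup :=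
    pv_entries_fst_nodup all_kos generated
  simp only [complete_mods]
  rw [pv_genkosA]
  set md := PySem.Dict.ofList m2k with hmd
  set E := (PySem.List.enumerate generated).filterMap (pvEntry all_kos) with hE
  have hkeys : (PySem.Dict.mk E).keys = E.map (·.1) := rfl
  rw [hkeys, List.foldl_map]
  have h2 := PySem.List.foldl_congr_mem E
    (fun gm p => md.keys.foldl (fun gm mod =>
        if (md.getD mod []).foldl (fun c ko => if ((PySem.Dict.mk E).getD p.1 []).contains ko then c else false) true
        then gm.modify p.1 [] (· ++ [mod]) else gm) gm)
    (fun gm p => (pvMods md p.2).foldl (fun gm x => gm.modify p.1 [] (· ++ [x])) gm)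
    (PySem.Dict.mk [])
    (fun gm p hp => by
      have hget : (PySem.Dict.mk E).getD p.1 [] = p.2 := by
        have hp' : (p.1, p.2) ∈ (PySem.Dict.mk E).items := hp
        exact PySem.Dict.getD_of_mem_items _ hp' hnodup []
      simp only [hget]
      have h3 := PySem.List.foldl_congr_mem md.keys
        (fun gm mod => if (md.getD mod []).foldl (fun c ko => if p.2.contains ko then c else false) true
          then gm.modify p.1 [] (· ++ [mod]) else gm)
        (fun gm mod => if (md.getD mod []).all (fun ko => p.2.contains ko)
          then gm.modify p.1 [] (· ++ [mod]) else gm)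
        gm
        (fun gm mod _ => by dsimp only; rw [pv_completeA (fun ko => p.2.contains ko) (md.getD mod []) true, Bool.true_and])
      rw [h3, PySem.List.foldl_if_eq_foldl_filter]
      rfl)
  rw [h2, pv_fresh_loop (fun p : Int × List String => pvMods md p.2) E []
    (by intro q hq; simp at hq) hnodup]
  rw [List.nil_append, hE, List.filterMap_filterMap]
  rfl


theorem pv_countP_flatMap {alpha beta : Type} (p : beta → Bool) (g : alpha → List beta) :
    ∀ l : List alpha, (l.flatMap g).countP p = (l.map (fun a => (g a).countP p)).sum := by
  intro l
  induction l with
  | nil => simp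
  | cons x l ih => simp [List.countP_append, ih]

theorem pv_sum_single {kappa nu : Type} [DecidableEq kappa] (k0 : kappa) (v0 : nu) (F : nu → Nat) :
    ∀ l : List (kappa × nu), (l.map (·.1)).Nodup → (k0, v0) ∈ l →
    (l.map (fun mr => if mr.1 = k0 then F mr.2 else 0)).sum = F v0 := by
  intro l
  induction l with
  | nil => intro _ h; simp at h
  | cons mr l ih =>
    intro hnd hmem
    simp only [List.map_cons, List.nodup_cons] at hnd
    rcases List.mem_cons.mp hmem with heq | hmem'
    · subst heq
      have hz : (l.map (fun mr => if mr.1 = k0 then F mr.2 else 0)).sum = 0 := by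
        apply List.sum_eq_zero
        intro x hx
        rcases List.mem_map.mp hx with ⟨mr', hmr', hval⟩
        have : mr'.1 ≠ k0 := by
          intro he
          exact hnd.1 (he ▸ (List.mem_map.mpr ⟨mr', hmr', rfl⟩))
        rw [← hval, if_neg this]
      simp [hz]
    · have hne : mr.1 ≠ k0 := by
        intro he
        exact hnd.1 (he ▸ (List.mem_map.mpr ⟨(k0, v0), hmem', rfl⟩))
      simp only [List.map_cons, List.sum_cons, if_neg hne]
      rw [ih hnd.2 hmem']
      omega

theorem pv_sum_ite {alpha : Type} (p : alpha → Prop) [DecidablePred p] :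
    ∀ l : List alpha, (l.map (fun x => if p x then 1 else 0)).sum = l.countP (fun x => decide (p x)) := by
  intro l
  induction l with
  | nil => simp
  | cons x l ih => by_cases h : p x <;> simp [h, ih, List.countP_cons] <;> omega

theorem pv_countP_len_iff (K R : List String) (hK : K.Nodup) (hR : R.Nodup) :
    (K.countP (fun x => decide (x ∈ R)) = R.length) ↔ ∀ x ∈ R, x ∈ K := by
  have hfil : (K.filter (fun x => decide (x ∈ R))).toFinset = K.toFinset ∩ R.toFinset := by
    apply Finset.ext
    intro a
    simp [List.mem_toFinset]
  have hfn : (K.filter (fun x => decide (x ∈ R))).Nodup := hK.filter _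
  have hlen : K.countP (fun x => decide (x ∈ R)) = (K.toFinset ∩ R.toFinset).card := by
    rw [← hfil, List.toFinset_card_of_nodup hfn, List.countP_eq_length_filter]
  rw [hlen, ← List.toFinset_card_of_nodup hR]
  constructor
  · intro hcard x hxR
    have hsub : K.toFinset ∩ R.toFinset ⊆ R.toFinset := Finset.inter_subset_right
    have := Finset.eq_of_subset_of_card_le hsub (le_of_eq hcard.symm)
    have hx : x ∈ R.toFinset := List.mem_toFinset.mpr hxR
    rw [← this] at hx
    exact List.mem_toFinset.mp (Finset.mem_inter.mp hx).1
  · intro hsub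
    have : K.toFinset ∩ R.toFinset = R.toFinset := by
      apply Finset.inter_eq_right.mpr
      intro x hx
      exact List.mem_toFinset.mpr (hsub x (List.mem_toFinset.mp hx))
    rw [this]

theorem pv_dedup_nil {alpha : Type} [BEq alpha] [LawfulBEq alpha] (xs : List alpha) :
    PySem.List.dedup xs = [] ↔ xs = [] := by
  constructor
  · intro h
    apply List.eq_nil_iff_forall_not_mem.mpr
    intro x hx
    have := (PySem.Set.mem_ofList xs x).mpr hx
    rw [show PySem.Set.ofList xs = PySem.List.dedup xs from rfl, h] at this
    simp at this
  · intro h; subst h; rfl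


def pvSizes (md : PySem.Dict String (List String)) : PySem.Dict String Int :=
  md.items.foldl (fun s mr => s.insert mr.1 ((PySem.List.dedup mr.2).length : Int)) (PySem.Dict.mk [])

def pvIndex (md : PySem.Dict String (List String)) : PySem.Dict String (List String) :=
  md.items.foldl (fun ix mr => (PySem.List.dedup mr.2).foldl (fun ix ko => ix.modify ko [] (· ++ [mr.1])) ix) (PySem.Dict.mk [])

def pvCov (index : PySem.Dict String (List String)) (kos : List String) : PySem.Dict String Int :=
  kos.foldl (fun cov ko => (index.getD ko []).foldl (fun cov mod => cov.modify mod 0 (· + 1)) cov) (PySem.Dict.mk [])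

def pvModsB (md : PySem.Dict String (List String)) (kos : List String) : List String :=
  md.keys.filter (fun mod => (pvCov (pvIndex md) kos).getD mod 0 = (pvSizes md).getD mod 0)

theorem pv_sizes (m2k : List (String × List String)) (mod : String) (req : List String)
    (hmem : (mod, req) ∈ (PySem.Dict.ofList m2k).items) :
    (pvSizes (PySem.Dict.ofList m2k)).getD mod 0 = ((PySem.List.dedup req).length : Int) := by
  set md := PySem.Dict.ofList m2k with hmd
  have hfst : (md.items.map (fun x => x.1)).Nodup := PySem.Dict.nodup_keys_ofList m2k
  have hitems := PySem.Dict.items_foldl_insert_fresh md.items (fun mr => mr.1)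
      (fun mr => ((PySem.List.dedup mr.2).length : Int)) (PySem.Dict.mk [])
      (fun a _ => rfl) hfst
  have hmem2 : (mod, ((PySem.List.dedup req).length : Int)) ∈ (pvSizes md).items := by
    unfold pvSizes
    rw [hitems]
    exact List.mem_append.mpr (Or.inr (List.mem_map.mpr ⟨(mod, req), hmem, rfl⟩))
  have hkeys : (pvSizes md).keys.Nodup := by
    show ((pvSizes md).items.map (fun x => x.1)).Nodup
    unfold pvSizes
    rw [hitems]
    simp only [List.nil_append, List.map_map]
    simpa [Function.comp] using hfst
  exact PySem.Dict.getD_of_mem_items _ hmem2 hkeys 0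

theorem pv_index_getD (md : PySem.Dict String (List String)) (ko : String) :
    (pvIndex md).getD ko []
      = ((md.items.flatMap (fun mr => (PySem.List.dedup mr.2).map (fun k => (k, mr.1)))).filter
          (fun q => q.1 == ko)).map (·.2) := by
  unfold pvIndex
  have h1 := PySem.List.foldl_congr_mem md.items
    (fun ix mr => (PySem.List.dedup mr.2).foldl (fun ix ko => ix.modify ko [] (· ++ [mr.1])) ix)
    (fun ix mr => ((PySem.List.dedup mr.2).map (fun k => (k, mr.1))).foldl
        (fun ix q => ix.modify q.1 [] (· ++ [q.2])) ix)
    (PySem.Dict.mk [])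
    (fun ix mr _ => by dsimp only; rw [List.foldl_map])
  rw [h1, pv_foldl_flatten (fun mr : String × List String => (PySem.List.dedup mr.2).map (fun k => (k, mr.1)))
      (fun (ix : PySem.Dict String (List String)) (q : String × String) => ix.modify q.1 [] (· ++ [q.2]))
      md.items (PySem.Dict.mk [])]
  rw [PySem.Dict.getD_foldl_modify_append]
  rfl

theorem pv_count_index (m2k : List (String × List String)) (mod : String) (req : List String)
    (hmem : (mod, req) ∈ (PySem.Dict.ofList m2k).items) (ko : String) :
    List.count mod ((pvIndex (PySem.Dict.ofList m2k)).getD ko [])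
      = if ko ∈ PySem.List.dedup req then 1 else 0 := by
  set md := PySem.Dict.ofList m2k with hmd
  rw [pv_index_getD, List.count_eq_countP, List.countP_map, List.countP_filter]
  rw [pv_countP_flatMap]
  simp only [Function.comp]
  have hpt : ∀ mr ∈ md.items,
      ((PySem.List.dedup mr.2).map (fun k => (k, mr.1))).countP (fun a => (a.2 == mod) && (a.1 == ko))
        = if mr.1 = mod then List.count ko (PySem.List.dedup mr.2) else 0 := by
    intro mr _
    rw [List.countP_map]
    by_cases h : mr.1 = mod
    · rw [if_pos h, List.count_eq_countP]
      apply List.countP_congr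
      intro k _
      simp [Function.comp, h]
    · rw [if_neg h]
      apply List.countP_eq_zero.mpr
      intro a ha
      simp [Function.comp, h]
  rw [List.map_congr_left hpt]
  have hfst : (md.items.map (fun x => x.1)).Nodup := PySem.Dict.nodup_keys_ofList m2k
  rw [pv_sum_single mod req (fun r => List.count ko (PySem.List.dedup r)) md.items hfst hmem]
  by_cases hk : ko ∈ PySem.List.dedup req
  · rw [if_pos hk]
    exact List.count_eq_one_of_mem (PySem.List.nodup_dedup req) hk
  · rw [if_neg hk]
    exact List.count_eq_zero_of_not_mem hk

theorem pv_cov (m2k : List (String × List String)) (mod : String) (req : List String)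
    (hmem : (mod, req) ∈ (PySem.Dict.ofList m2k).items) (kos : List String) :
    (pvCov (pvIndex (PySem.Dict.ofList m2k)) kos).getD mod 0
      = (kos.countP (fun ko => decide (ko ∈ PySem.List.dedup req)) : Int) := by
  set md := PySem.Dict.ofList m2k with hmd
  unfold pvCov
  rw [pv_foldl_flatten (fun ko : String => (pvIndex md).getD ko [])
      (fun (cov : PySem.Dict String Int) (m : String) => cov.modify m 0 (· + 1)) kos (PySem.Dict.mk [])]
  rw [PySem.Dict.getD_foldl_modify_add_one]
  have h0 : (PySem.Dict.mk ([] : List (String × Int))).getD mod 0 = 0 := rfl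
  rw [h0, List.count_eq_countP, pv_countP_flatMap]
  have hpt : ∀ ko ∈ kos, ((pvIndex md).getD ko []).countP (· == mod)
      = if ko ∈ PySem.List.dedup req then 1 else 0 := by
    intro ko _
    rw [← List.count_eq_countP]
    exact pv_count_index m2k mod req hmem ko
  rw [List.map_congr_left hpt, pv_sum_ite (fun ko => ko ∈ PySem.List.dedup req) kos]
  simp


theorem pv_mods_eq (m2k : List (String × List String)) (kos0 : List String) :
    pvModsB (PySem.Dict.ofList m2k) (PySem.List.dedup kos0) = pvMods (PySem.Dict.ofList m2k) kos0 := by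
  set md := PySem.Dict.ofList m2k with hmd
  unfold pvModsB pvMods
  apply List.filter_congr
  intro mod hmod
  obtain ⟨req, hreq⟩ : ∃ req, md.get? mod = some req := by
    rcases h : md.get? mod with _ | req
    · exact absurd hmod ((PySem.Dict.get?_eq_none_iff_not_mem_keys md mod).mp h)
    · exact ⟨req, rfl⟩
  have hmem : (mod, req) ∈ md.items :=
    (PySem.Dict.get?_eq_some_iff_mem_items md mod req (PySem.Dict.nodup_keys_ofList m2k)).mp hreq
  have hgetD : md.getD mod [] = req := by simp [PySem.Dict.getD, hreq]
  rw [hgetD, pv_cov m2k mod req hmem (PySem.List.dedup kos0), pv_sizes m2k mod req hmem]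
  have hiff : ((PySem.List.dedup kos0).countP (fun ko => decide (ko ∈ PySem.List.dedup req))
      = (PySem.List.dedup req).length) ↔ (∀ x ∈ req, x ∈ kos0) := by
    rw [pv_countP_len_iff _ _ (PySem.List.nodup_dedup kos0) (PySem.List.nodup_dedup req)]
    constructor
    · intro h x hx
      exact (PySem.List.mem_dedup _ _).mp (h x ((PySem.List.mem_dedup _ _).mpr hx))
    · intro h x hx
      exact (PySem.List.mem_dedup _ _).mpr (h x ((PySem.List.mem_dedup _ _).mp hx))
  rw [Bool.eq_iff_iff]
  simp only [decide_eq_true_eq, List.all_eq_true, Int.natCast_inj]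
  constructor
  · intro h
    intro ko hko
    simp [(hiff.mp h) ko hko]
  · intro h
    apply hiff.mpr
    intro x hx
    simpa using h x hx

theorem pv_fresh_insert_loop_if {kappa alpha nu : Type} [BEq kappa] [LawfulBEq kappa]
    (c1 c2 : kappa × alpha → Bool) (v : kappa × alpha → nu)
    (es : List (kappa × alpha)) (hnd : (es.map (·.1)).Nodup) :
    es.foldl (fun gm p => if c1 p then gm else if c2 p then gm else gm.insert p.1 (v p)) (PySem.Dict.mk [])
      = PySem.Dict.mk (es.filterMap (fun p =>
          if c1 p then none else if c2 p then none else some (p.1, v p))) := by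
  have h1 := PySem.List.foldl_congr_mem es
    (fun gm p => if c1 p then gm else if c2 p then gm else gm.insert p.1 (v p))
    (fun gm p => match (if c1 p then none else if c2 p then none else some (v p) : Option nu) with
      | none => gm | some w => gm.insert p.1 w)
    (PySem.Dict.mk [])
    (fun gm p _ => by
      dsimp only
      by_cases hc1 : c1 p
      · simp [hc1]
      · by_cases hc2 : c2 p <;> simp [hc1, hc2])
  rw [h1, pv_fresh_insert_loop (fun p => if c1 p then none else if c2 p then none else some (v p)) es []
    (by intro q hq; simp at hq) hnd]
  rw [List.nil_append]
  congr 1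
  apply List.filterMap_congr
  intro p _
  by_cases hc1 : c1 p
  · simp [hc1]
  · by_cases hc2 : c2 p <;> simp [hc1, hc2]

theorem pv_B_char (generated : List (List Int)) (all_kos : List String) (m2k : List (String × List String)) :
    complete_mods_alt generated all_kos m2k
      = (PySem.List.enumerate generated).filterMap (fun ir =>
          if (PySem.List.dedup (pvKos all_kos ir.2)).isEmpty then none
          else if (pvModsB (PySem.Dict.ofList m2k) (PySem.List.dedup (pvKos all_kos ir.2))).isEmpty then none
          else some (ir.1, pvModsB (PySem.Dict.ofList m2k) (PySem.List.dedup (pvKos all_kos ir.2)))) := by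
  simp only [complete_mods_alt]
  rw [PySem.List.foldl_prod_mk
    (fun (s : PySem.Dict String Int) (mr : String × List String) =>
      s.insert mr.1 ((PySem.List.dedup mr.2).length : Int))
    (fun (ix : PySem.Dict String (List String)) (mr : String × List String) =>
      (PySem.List.dedup mr.2).foldl (fun ix ko => ix.modify ko [] (· ++ [mr.1])) ix)
    (PySem.Dict.ofList m2k).items (PySem.Dict.mk []) (PySem.Dict.mk [])]
  show ((PySem.List.enumerate generated).foldl
      (fun gm ir =>
        if (PySem.List.dedup (pvKos all_kos ir.2)).isEmpty then gm
        else if (pvModsB (PySem.Dict.ofList m2k) (PySem.List.dedup (pvKos all_kos ir.2))).isEmpty then gm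
        else gm.insert ir.1 (pvModsB (PySem.Dict.ofList m2k) (PySem.List.dedup (pvKos all_kos ir.2))))
      (PySem.Dict.mk [])).items = _
  rw [pv_fresh_insert_loop_if
    (fun ir : Int × List Int => (PySem.List.dedup (pvKos all_kos ir.2)).isEmpty)
    (fun ir : Int × List Int => (pvModsB (PySem.Dict.ofList m2k) (PySem.List.dedup (pvKos all_kos ir.2))).isEmpty)
    (fun ir : Int × List Int => pvModsB (PySem.Dict.ofList m2k) (PySem.List.dedup (pvKos all_kos ir.2)))
    (PySem.List.enumerate generated) (pv_nodup_fst_enumerate generated)]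

theorem pv_final (generated : List (List Int)) (all_kos : List String) (m2k : List (String × List String)) :
    complete_mods generated all_kos m2k = complete_mods_alt generated all_kos m2k := by
  rw [pv_A_char, pv_B_char]
  apply List.filterMap_congr
  intro ir _
  unfold pvOut pvEntry
  by_cases h1 : pvKos all_kos ir.2 = []
  · have : (PySem.List.dedup (pvKos all_kos ir.2)).isEmpty = true := by
      rw [List.isEmpty_iff, pv_dedup_nil]
      exact h1
    simp [h1, this]
  · have hde : (PySem.List.dedup (pvKos all_kos ir.2)).isEmpty = false := by
      rw [Bool.eq_false_iff]
      intro hc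
      exact h1 ((pv_dedup_nil _).mp (List.isEmpty_iff.mp hc))
    rw [if_neg h1, show ∀ (a : Int × List String) (f : Int × List String → Option (Int × List String)), (some a).bind f = f a from fun _ _ => rfl, hde, pv_mods_eq m2k (pvKos all_kos ir.2)]
    by_cases h2 : pvMods (PySem.Dict.ofList m2k) (pvKos all_kos ir.2) = []
    · simp [h2, List.isEmpty_iff]
    · simp [h2, List.isEmpty_iff]

-- ===== VERDICT (by name: the statement is the Claim_ definition above) =====
theorem complete_mods_spec : Claim_equal_complete_mods := by
  intro generated all_kos m2k _ _
  unfold Spec_complete_mods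
  exact pv_final generated all_kos m2k
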